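-- pv_equiv track=rewrite | github.com/Kevin-Norlin/adventofcode2024 | day9.py | get_slot_with_space
-- ===== SOURCE A (Python) =====
-- def get_slot_with_space(dot_form: list[str], file_size: int) -> int:
--     # Find a slot that is min the file size
--     for i, elem in enumerate(dot_form):
--         if elem == ".":
--             ptr = i
--             acc = 0
--             while True:
--                 if ptr > len(dot_form) - 1 or dot_form[ptr] != ".":
--                     i += acc
--                     break
--                 acc += 1
--                 ptr += 1
--                 if acc >= file_size:
--                     return i
--     return -1 # No slot found
-- ===== SOURCE B (Python) =====
-- def get_slot_with_space(dot_form: list[str], file_size: int) -> int: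
--     # Single pass: track the length of the current run of "." and return its
--     # start index as soon as the run length reaches file_size.
--     run = 0
--     for i, elem in enumerate(dot_form):
--         if elem == ".":
--             run += 1
--             if run >= file_size:
--                 return i - run + 1
--         else:
--             run = 0
--     return -1
-- ===== Notes on version B (the rewrite author's own statement) =====
-- stated objective: alternative
-- what changed: Replaced A's restart-a-scan-at-every-index search (outer enumerate plus inner while rescanning each dot run) with a single pass that tracks the current dot-run length and returns the run's start index once it reaches file_size.
import Mathlib
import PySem

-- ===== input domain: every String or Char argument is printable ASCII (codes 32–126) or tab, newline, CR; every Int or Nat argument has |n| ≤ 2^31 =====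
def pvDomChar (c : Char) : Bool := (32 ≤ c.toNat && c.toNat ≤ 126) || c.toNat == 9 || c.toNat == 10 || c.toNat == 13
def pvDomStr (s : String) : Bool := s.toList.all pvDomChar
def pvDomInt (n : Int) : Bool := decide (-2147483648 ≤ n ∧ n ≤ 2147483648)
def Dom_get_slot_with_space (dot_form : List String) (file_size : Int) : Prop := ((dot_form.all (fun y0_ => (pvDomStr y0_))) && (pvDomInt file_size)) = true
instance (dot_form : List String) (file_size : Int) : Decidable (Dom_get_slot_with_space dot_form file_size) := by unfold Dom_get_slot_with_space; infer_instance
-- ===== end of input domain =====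

-- B replaces A's rescan-from-every-index search with a single pass that tracks
-- the current dot-run length (objective: alternative single-pass algorithm).

-- ===== PORT A =====
-- inner 'while True' loop of A: scans dots from ptr, acc counts them, returns i when acc ≥ file_size
def pvGoA (l : List String) (fs : Int) (ptr : Nat) (acc i : Int) : Option Int :=
  if l.length ≤ ptr then none            -- "ptr > len(dot_form) - 1" → break
  else if l.getD ptr "" ≠ "." then none  -- "dot_form[ptr] != '.'" → break (index is in range here)
  else if acc + 1 ≥ fs then some i       -- acc += 1; ptr += 1; "if acc >= file_size: return i"
  else pvGoA l fs (ptr + 1) (acc + 1) i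
termination_by l.length - ptr

-- outer 'for i, elem in enumerate(dot_form)' loop (the 'i += acc' before break is dead: 'i' is
-- reassigned by enumerate on the next iteration)
def pvOutA (l : List String) (fs : Int) (j : Nat) : Int :=
  if j < l.length then
    if l.getD j "" = "." then
      match pvGoA l fs j 0 (j : Int) with
      | some v => v
      | none => pvOutA l fs (j + 1)
    else pvOutA l fs (j + 1)
  else -1                                -- "return -1  # No slot found"
termination_by l.length - j

def get_slot_with_space (dot_form : List String) (file_size : Int) : Int :=
  pvOutA dot_form file_size 0

-- ===== PORT B =====
-- single pass: run = length of current dot run, i = current index; on run ≥ file_size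
-- return the run's start index i - run + 1
def pvGoB (l : List String) (fs : Int) (i run : Int) : Int :=
  match l with
  | [] => -1
  | x :: r =>
    if x = "." then
      if run + 1 ≥ fs then i - (run + 1) + 1
      else pvGoB r fs (i + 1) (run + 1)
    else pvGoB r fs (i + 1) 0

def get_slot_with_space_alt (dot_form : List String) (file_size : Int) : Int :=
  pvGoB dot_form file_size 0 0

-- ===== PRECONDITION & SPEC =====
def Spec_get_slot_with_space (dot_form : List String) (file_size : Int) (out : Int) : Prop := out = get_slot_with_space_alt dot_form file_size
instance (dot_form : List String) (file_size : Int) (out : Int) : Decidable (Spec_get_slot_with_space dot_form file_size out) := by unfold Spec_get_slot_with_space; infer_instance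

-- ===== CLAIM (what is proved, stated in full; the proofs are below) =====
def Claim_equal_get_slot_with_space : Prop := ∀ (dot_form : List String) (file_size : Int), Dom_get_slot_with_space dot_form file_size → Spec_get_slot_with_space dot_form file_size (get_slot_with_space dot_form file_size)

-- ===== LEMMAS AND PROOFS =====

-- T s = length of the leading run of "." in s
def pvT (s : List String) : Nat := (s.takeWhile (· == ".")).length

-- structural version of A's outer loop, over the suffix it still has to visit
def pvOutA' (s : List String) (fs : Int) (j : Int) : Int :=
  match s with
  | [] => -1
  | x :: r =>
    if x = "." then
      if fs ≤ (pvT (x :: r) : Int) then j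
      else pvOutA' r fs (j + 1)
    else pvOutA' r fs (j + 1)

theorem pvT_cons_dot (r : List String) : pvT ("." :: r) = pvT r + 1 := by
  simp [pvT]

theorem pvT_cons_not (x : String) (r : List String) (hx : ¬ x = ".") : pvT (x :: r) = 0 := by
  simp [pvT, hx]

-- A's inner loop returns `some i` exactly when the leading dot run from ptr is nonempty
-- and long enough to push acc up to fs
theorem pvGoA_char (l : List String) (fs : Int) : ∀ (ptr : Nat) (acc i : Int),
    pvGoA l fs ptr acc i =
      if 1 ≤ pvT (l.drop ptr) ∧ fs ≤ acc + (pvT (l.drop ptr) : Int) then some i else none := by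
  intro ptr
  induction' h : l.length - ptr with n ih generalizing ptr
  · intro acc i
    have hge : l.length ≤ ptr := by omega
    rw [pvGoA, if_pos hge, if_neg]
    simp [List.drop_eq_nil_of_le hge, pvT]
  · intro acc i
    have hlt : ptr < l.length := by omega
    have hdrop : l.drop ptr = l[ptr] :: l.drop (ptr + 1) := List.drop_eq_getElem_cons hlt
    have hgetD : l[ptr]?.getD "" = l[ptr] := by rw [List.getElem?_eq_getElem hlt]; rfl
    rw [pvGoA, if_neg (by omega)]
    by_cases hx : l[ptr] = "."
    · have hT : pvT (l.drop ptr) = pvT (l.drop (ptr + 1)) + 1 := by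
        rw [hdrop, hx, pvT_cons_dot]
      rw [if_neg (by simp [List.getD, hgetD, hx]), hT]
      by_cases hacc : acc + 1 ≥ fs
      · rw [if_pos hacc, if_pos ⟨by omega, by push_cast; omega⟩]
      · rw [if_neg hacc, ih (ptr + 1) (by omega) (acc + 1) i]
        by_cases hc : 1 ≤ pvT (l.drop (ptr + 1)) ∧ fs ≤ acc + 1 + (pvT (l.drop (ptr + 1)) : Int)
        · rw [if_pos hc, if_pos ⟨by omega, by push_cast; omega⟩]
        · rw [if_neg hc, if_neg]
          rintro ⟨h1, h2⟩
          push_cast at h2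
          exact hc ⟨by omega, by omega⟩
    · have hT : pvT (l.drop ptr) = 0 := by rw [hdrop]; exact pvT_cons_not _ _ hx
      rw [if_pos (by simp [List.getD, hgetD, hx]), hT]
      rw [if_neg (by rintro ⟨h1, _⟩; omega)]

-- A's outer loop equals its structural version on the remaining suffix
theorem pvOutA_eq (l : List String) (fs : Int) : ∀ (j : Nat),
    pvOutA l fs j = pvOutA' (l.drop j) fs (j : Int) := by
  intro j
  induction' h : l.length - j with n ih generalizing j
  · have hge : l.length ≤ j := by omega
    rw [pvOutA, if_neg (by omega), List.drop_eq_nil_of_le hge, pvOutA']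
  · have hlt : j < l.length := by omega
    have hdrop : l.drop j = l[j] :: l.drop (j + 1) := List.drop_eq_getElem_cons hlt
    have hgetD : l[j]?.getD "" = l[j] := by rw [List.getElem?_eq_getElem hlt]; rfl
    have hcast : ((j + 1 : Nat) : Int) = (j : Int) + 1 := by push_cast; ring
    have hrec : pvOutA l fs (j + 1) = pvOutA' (l.drop (j + 1)) fs ((j : Int) + 1) := by
      rw [ih (j + 1) (by omega), hcast]
    rw [pvOutA, if_pos hlt]
    by_cases hx : l[j] = "."
    · have hT1 : 1 ≤ pvT (l.drop j) := by rw [hdrop, hx, pvT_cons_dot]; omega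
      rw [if_pos (by simp [List.getD, hgetD, hx]), pvGoA_char]
      by_cases hfs : fs ≤ (pvT (l.drop j) : Int)
      · rw [if_pos ⟨hT1, by omega⟩]
        rw [hdrop, pvOutA', if_pos hx, ← hdrop, if_pos hfs]
      · rw [if_neg (by rintro ⟨_, h2⟩; omega)]
        rw [hdrop, pvOutA', if_pos hx, ← hdrop, if_neg hfs, ← hrec]
    · rw [if_neg (by simp [List.getD, hgetD, hx]), hrec, hdrop, pvOutA', if_neg hx]

-- B returns the start of the current run as soon as the leading dots suffice
theorem pvGoB_hit (fs : Int) : ∀ (s : List String) (i run : Int),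
    0 ≤ run → 1 ≤ pvT s → fs ≤ run + (pvT s : Int) →
    pvGoB s fs i run = i - run := by
  intro s
  induction s with
  | nil => intro i run _ hT _; simp [pvT] at hT
  | cons x r ih =>
    intro i run hrun hT hfs
    by_cases hx : x = "."
    · subst hx
      rw [pvT_cons_dot] at hfs
      rw [pvGoB, if_pos rfl]
      by_cases hhit : run + 1 ≥ fs
      · rw [if_pos hhit]; ring
      · have hTr : 1 ≤ pvT r := by push_cast at hfs; omega
        rw [if_neg hhit, ih (i + 1) (run + 1) (by omega) hTr (by push_cast at hfs ⊢; omega)]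
        ring
    · rw [pvT_cons_not _ _ hx] at hT; omega

-- main lemma: B with a carried run that cannot reach fs (or run = 0) computes A's answer
theorem pvMain (fs : Int) : ∀ (s : List String) (j run : Int),
    0 ≤ run → (run = 0 ∨ fs > run + (pvT s : Int)) →
    pvGoB s fs j run = pvOutA' s fs j := by
  intro s
  induction s with
  | nil => intro j run _ _; rw [pvGoB, pvOutA']
  | cons x r ih =>
    intro j run hrun hcase
    by_cases hx : x = "."
    · subst hx
      have hTc : pvT ("." :: r) = pvT r + 1 := pvT_cons_dot r
      by_cases hbig : fs > run + (pvT ("." :: r) : Int)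
      · -- the whole current run is too short: both sides step past this dot
        rw [hTc] at hbig; push_cast at hbig
        have hno : ¬ run + 1 ≥ fs := by omega
        rw [pvGoB, if_pos rfl, if_neg hno, pvOutA', if_pos rfl,
          if_neg (by rw [hTc]; push_cast; omega)]
        exact ih (j + 1) (run + 1) (by omega) (Or.inr (by omega))
      · -- run = 0 and the leading run reaches fs: both return j
        have hr0 : run = 0 := by tauto
        have hfs : fs ≤ (pvT ("." :: r) : Int) := by omega
        have hT1 : 1 ≤ pvT ("." :: r) := by rw [hTc]; omega
        rw [pvGoB_hit fs ("." :: r) j run hrun hT1 (by omega),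
          pvOutA', if_pos rfl, if_pos hfs, hr0]
        ring
    · rw [pvGoB, if_neg hx, pvOutA', if_neg hx]
      exact ih (j + 1) 0 le_rfl (Or.inl rfl)

-- ===== VERDICT (by name: the statement is the Claim_ definition above) =====
theorem get_slot_with_space_spec : Claim_equal_get_slot_with_space := by
  intro l fs _
  show pvOutA l fs 0 = pvGoB l fs 0 0
  rw [pvOutA_eq l fs 0, pvMain fs l 0 0 le_rfl (Or.inl rfl)]
  simp
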